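-- pv_equiv track=rewrite | github.com/Elizabethyonas/A2SV-progress | On-boarding/escape-the-ghosts.py | escapeGhosts
-- ===== SOURCE A (Python) =====
-- from typing import List
--
-- def escapeGhosts(ghosts: List[List[int]], target: List[int]) -> bool:
--     for i in range(len(ghosts)):
--         x1=ghosts[i][0]
--         y1=ghosts[i][1]
--         x2=target[0]
--         y2=target[1]
--         my_step=abs(x2)+abs(y2)
--         ghosts_step=abs(x2-x1)+abs(y2-y1)
--         if my_step>=ghosts_step:
--             return False
--
--
--     return True
-- ===== SOURCE B (Python) =====
-- def escapeGhosts(ghosts, target):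
--     tx, ty = target[0], target[1]
--     dists = sorted(abs(tx - g[0]) + abs(ty - g[1]) for g in ghosts)
--     if not dists:
--         return True
--     return abs(tx) + abs(ty) < dists[0]
-- ===== Notes on version B (the rewrite author's own statement) =====
-- stated objective: alternative
-- what changed: Replaced A's early-return index loop by staged passes: build the list of all ghost Manhattan distances, sort it, and compare the player's distance only against the head of the sorted list (empty list means escape).
-- outside the precondition, e.g. on escapeGhosts([], []): A returns True, B raises IndexError; on escapeGhosts([[0, 0], [5]], [10, 10]): A returns False, B raises IndexError
import Mathlib
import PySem

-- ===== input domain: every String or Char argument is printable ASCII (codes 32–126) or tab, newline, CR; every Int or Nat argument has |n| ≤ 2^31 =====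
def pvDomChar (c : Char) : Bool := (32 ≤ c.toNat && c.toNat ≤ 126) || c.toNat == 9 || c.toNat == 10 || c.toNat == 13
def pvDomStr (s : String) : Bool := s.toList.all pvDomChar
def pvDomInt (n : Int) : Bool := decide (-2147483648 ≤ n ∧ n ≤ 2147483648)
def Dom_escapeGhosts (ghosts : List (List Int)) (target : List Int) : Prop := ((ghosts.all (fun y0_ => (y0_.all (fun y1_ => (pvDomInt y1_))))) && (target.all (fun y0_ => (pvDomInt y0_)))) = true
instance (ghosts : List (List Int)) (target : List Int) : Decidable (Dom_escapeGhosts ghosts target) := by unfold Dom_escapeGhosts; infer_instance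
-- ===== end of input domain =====

-- B replaces A's early-return per-ghost comparison loop by staged passes: map ghosts to
-- their distances, sort that list, compare the player's distance with its head only
-- (objective: alternative decomposition).

-- ===== PORT A =====
-- A's 'for i in range(len(ghosts))' with early 'return False'; indexing via pyGetD
-- (exact under Pre_, where every access is in range).
def escapeGhostsLoop (ghosts : List (List Int)) (target : List Int) : List Int → Bool
  | [] => true
  | i :: rest =>
    let x1 := PySem.List.pyGetD (PySem.List.pyGetD ghosts i []) 0 0
    let y1 := PySem.List.pyGetD (PySem.List.pyGetD ghosts i []) 1 0
    let x2 := PySem.List.pyGetD target 0 0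
    let y2 := PySem.List.pyGetD target 1 0
    let my_step := |x2| + |y2|
    let ghosts_step := |x2 - x1| + |y2 - y1|
    if ghosts_step ≤ my_step then false else escapeGhostsLoop ghosts target rest

def escapeGhosts (ghosts : List (List Int)) (target : List Int) : Bool :=
  escapeGhostsLoop ghosts target (PySem.List.pyRange 0 ghosts.length 1)

-- ===== PORT B =====
-- B's sorted list of distances; 'if not dists: return True' then compare with dists[0].
def escapeGhosts_alt (ghosts : List (List Int)) (target : List Int) : Bool :=
  let tx := PySem.List.pyGetD target 0 0
  let ty := PySem.List.pyGetD target 1 0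
  let dists := PySem.List.sorted
    (ghosts.map (fun g => |tx - PySem.List.pyGetD g 0 0| + |ty - PySem.List.pyGetD g 1 0|))
    (fun x => x) false
  match dists with
  | [] => true
  | d :: _ => decide (|tx| + |ty| < d)

-- ===== PRECONDITION & SPEC =====
-- Pre_ excludes inputs where target or some ghost row has fewer than 2 entries: Python A
-- raises IndexError there except when it never reaches the bad access (empty ghosts, or an
-- early False before a malformed later ghost), while B always reads target and every ghost.
def Pre_escapeGhosts (ghosts : List (List Int)) (target : List Int) : Prop :=
  2 ≤ target.length ∧ ∀ g ∈ ghosts, 2 ≤ g.length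
instance (ghosts : List (List Int)) (target : List Int) : Decidable (Pre_escapeGhosts ghosts target) := by unfold Pre_escapeGhosts; infer_instance
def pvWitness_escapeGhosts : List (List Int) × List Int := ([[1, 0], [0, 3]], [2, 2])

def Spec_escapeGhosts (ghosts : List (List Int)) (target : List Int) (out : Bool) : Prop := out = escapeGhosts_alt ghosts target
instance (ghosts : List (List Int)) (target : List Int) (out : Bool) : Decidable (Spec_escapeGhosts ghosts target out) := by unfold Spec_escapeGhosts; infer_instance

-- ===== CLAIM (what is proved, stated in full; the proofs are below) =====
def Claim_equal_escapeGhosts : Prop := ∀ (ghosts : List (List Int)) (target : List Int), Dom_escapeGhosts ghosts target → Pre_escapeGhosts ghosts target → Spec_escapeGhosts ghosts target (escapeGhosts ghosts target)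

-- ===== LEMMAS AND PROOFS =====

-- distance from target (read with defaults, as both ports do) to a ghost row
def pvDist (tx ty : Int) (g : List Int) : Int :=
  |tx - PySem.List.pyGetD g 0 0| + |ty - PySem.List.pyGetD g 1 0|

-- player's distance
def pvPlayer (target : List Int) : Int :=
  |PySem.List.pyGetD target 0 0| + |PySem.List.pyGetD target 1 0|

-- A's loop over the remaining indices computes "every remaining ghost is strictly farther"
theorem escapeGhostsLoop_eq (ghosts : List (List Int)) (target : List Int) :
    ∀ (k : Nat), escapeGhostsLoop ghosts target (PySem.List.pyRange (k : Int) ghosts.length 1) =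
      decide (∀ g ∈ ghosts.drop k, pvPlayer target < pvDist (PySem.List.pyGetD target 0 0) (PySem.List.pyGetD target 1 0) g) := by
  intro k
  induction hn : ghosts.length - k generalizing k with
  | zero =>
    have hk : ghosts.length ≤ k := by omega
    rw [PySem.List.pyRange_one_eq_nil (by exact_mod_cast hk)]
    rw [show escapeGhostsLoop ghosts target [] = true from rfl, List.drop_eq_nil_of_le hk]
    exact (decide_eq_true (by simp)).symm
  | succ n ih =>
    have hk : k < ghosts.length := by omega
    rw [PySem.List.pyRange_one_cons (by exact_mod_cast hk)]
    have hdrop : ghosts.drop k = ghosts[k] :: ghosts.drop (k + 1) :=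
      List.drop_eq_getElem_cons hk
    have hget : PySem.List.pyGetD ghosts (k : Int) [] = ghosts[k] := by
      have := PySem.List.pyGetD_eq_getElem (xs := ghosts) (i := (k : Int)) (d := [])
        (by omega) (by exact_mod_cast hk)
      simpa using this
    have hcast : ((k : Int) + 1) = ((k + 1 : Nat) : Int) := by push_cast; ring
    rw [show escapeGhostsLoop ghosts target ((k : Int) :: PySem.List.pyRange ((k : Int) + 1) ghosts.length 1) =
        (if |PySem.List.pyGetD target 0 0 - PySem.List.pyGetD (PySem.List.pyGetD ghosts (k : Int) []) 0 0| +
            |PySem.List.pyGetD target 1 0 - PySem.List.pyGetD (PySem.List.pyGetD ghosts (k : Int) []) 1 0| ≤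
            |PySem.List.pyGetD target 0 0| + |PySem.List.pyGetD target 1 0|
         then false
         else escapeGhostsLoop ghosts target (PySem.List.pyRange ((k : Int) + 1) ghosts.length 1)) from rfl]
    rw [hcast, ih (k + 1) (by omega), hget, hdrop]
    by_cases hc : pvDist (PySem.List.pyGetD target 0 0) (PySem.List.pyGetD target 1 0) ghosts[k] ≤ pvPlayer target
    · simp only [pvDist, pvPlayer] at hc ⊢
      rw [if_pos hc]
      symm
      rw [decide_eq_false_iff_not]
      intro hall
      exact absurd (hall ghosts[k] (List.mem_cons.mpr (Or.inl rfl))) (not_lt.mpr hc)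
    · simp only [pvDist, pvPlayer] at hc ⊢
      rw [if_neg hc]
      simp only [List.forall_mem_cons]
      have : |PySem.List.pyGetD target 0 0| + |PySem.List.pyGetD target 1 0| <
          |PySem.List.pyGetD target 0 0 - PySem.List.pyGetD ghosts[k] 0 0| +
          |PySem.List.pyGetD target 1 0 - PySem.List.pyGetD ghosts[k] 1 0| := by omega
      simp [this]

-- B's value, characterised the same way: the head of the sorted distance list is its
-- minimum, so 'player < head' iff 'player < every distance'.
theorem escapeGhosts_alt_eq (ghosts : List (List Int)) (target : List Int) :
    escapeGhosts_alt ghosts target =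
      decide (∀ g ∈ ghosts, pvPlayer target < pvDist (PySem.List.pyGetD target 0 0) (PySem.List.pyGetD target 1 0) g) := by
  unfold escapeGhosts_alt
  dsimp only
  cases hs : PySem.List.sorted
      (ghosts.map (fun g => |PySem.List.pyGetD target 0 0 - PySem.List.pyGetD g 0 0| +
        |PySem.List.pyGetD target 1 0 - PySem.List.pyGetD g 1 0|)) (fun x => x) false with
  | nil =>
    have : ghosts.map (fun g => |PySem.List.pyGetD target 0 0 - PySem.List.pyGetD g 0 0| +
        |PySem.List.pyGetD target 1 0 - PySem.List.pyGetD g 1 0|) = [] :=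
      (PySem.List.sorted_eq_nil_iff _ _ _).mp hs
    have hg : ghosts = [] := List.map_eq_nil_iff.mp this
    subst hg
    simp
  | cons d t =>
    have hmin : ∀ y ∈ ghosts.map (fun g => |PySem.List.pyGetD target 0 0 - PySem.List.pyGetD g 0 0| +
        |PySem.List.pyGetD target 1 0 - PySem.List.pyGetD g 1 0|), d ≤ y :=
      PySem.List.key_head_sorted_le _ _ hs
    have hdmem : d ∈ ghosts.map (fun g => |PySem.List.pyGetD target 0 0 - PySem.List.pyGetD g 0 0| +
        |PySem.List.pyGetD target 1 0 - PySem.List.pyGetD g 1 0|) := by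
      have : d ∈ d :: t := List.mem_cons_self ..
      rw [← hs] at this
      exact (PySem.List.mem_sorted _ _ _ _).mp this
    dsimp only
    by_cases hlt : pvPlayer target < d
    · simp only [pvPlayer] at hlt
      rw [decide_eq_true hlt]
      symm
      rw [decide_eq_true_iff]
      intro g hg
      have := hmin _ (List.mem_map_of_mem hg)
      simp only [pvPlayer, pvDist]
      omega
    · simp only [pvPlayer] at hlt
      rw [decide_eq_false hlt]
      symm
      rw [decide_eq_false_iff_not]
      intro hall
      obtain ⟨g, hg, hgd⟩ := List.mem_map.mp hdmem
      have := hall g hg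
      simp only [pvPlayer, pvDist] at this
      omega

-- ===== VERDICT (by name: the statement is the Claim_ definition above) =====
theorem escapeGhosts_spec : Claim_equal_escapeGhosts := by
  intro ghosts target _ _
  unfold Spec_escapeGhosts escapeGhosts
  have h0 : (0 : Int) = ((0 : Nat) : Int) := rfl
  rw [h0, escapeGhostsLoop_eq ghosts target 0, escapeGhosts_alt_eq]
  simp
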